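-- pv_equiv track=rewrite | github.com/torrresagus/UADE-Algoritmos-y-Estructura-de-Datos-I | Guia de Trabajos Practicos 2021/Trabajo Práctico 3 - Matrices/Ejercicio 1.py | columnasPalindromos
-- ===== SOURCE A (Python) =====
-- def columnasPalindromos(matriz):
--     lista = []
--     for i in range(len(matriz)):
--         columna = ""
--         for j in range(len(matriz)):
--             columna += str(matriz[j][i])
--         if columna == columna[::-1]:
--             lista.append(i)
--     return lista
-- ===== SOURCE B (Python) =====
-- def esPalindromo(s):
--     if len(s) < 2:
--         return True
--     return s[0] == s[-1] and esPalindromo(s[1:-1])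
--
--
-- def columnasPalindromos(matriz):
--     n = len(matriz)
--     return [i for i in range(n)
--             if esPalindromo("".join(str(matriz[j][i]) for j in range(n)))]
-- ===== Notes on version B (the rewrite author's own statement) =====
-- stated objective: idiomatic
-- what changed: B builds each column with ''.join over a generator and tests palindromes by a recursive end-peeling check (s[0]==s[-1] and recurse on s[1:-1]) inside a list comprehension, instead of A's manual += accumulation and comparison against a reversed slice copy.
import Mathlib
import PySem

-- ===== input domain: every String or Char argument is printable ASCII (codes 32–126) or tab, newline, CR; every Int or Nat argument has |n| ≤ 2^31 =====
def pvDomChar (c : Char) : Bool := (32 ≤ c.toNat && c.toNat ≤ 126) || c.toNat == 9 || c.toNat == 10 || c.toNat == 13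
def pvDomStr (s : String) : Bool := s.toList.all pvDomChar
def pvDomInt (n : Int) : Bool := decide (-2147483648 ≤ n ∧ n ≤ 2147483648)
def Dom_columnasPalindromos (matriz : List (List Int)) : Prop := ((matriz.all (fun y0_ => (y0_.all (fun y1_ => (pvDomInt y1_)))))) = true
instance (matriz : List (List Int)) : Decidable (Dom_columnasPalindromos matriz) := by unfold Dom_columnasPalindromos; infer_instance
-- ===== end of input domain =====

-- B replaces A's manual += accumulation and reversed-slice comparison by ''.join per column and a
-- recursive end-peeling palindrome check (s[0]==s[-1] and recurse on s[1:-1]); objective: idiomatic.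

-- ===== PORT A =====
-- column strings are ported as List Char; 'columna == columna[::-1]' is 'columna = columna.reverse'
-- (exact by PySem.Str.slice?_none_none_neg_one: s[::-1] is the reverse).
-- 'columna' built by the j-loop (inlined at its two uses in the palindrome test)
def columnaA (matriz : List (List Int)) (i : Int) : List Char :=
  (PySem.List.pyRange 0 (matriz.length : Int)).foldl
    (fun columna j => columna ++ PySem.Int.toChars (PySem.List.pyGetD (PySem.List.pyGetD matriz j []) i 0)) []

def columnasPalindromos (matriz : List (List Int)) : List Int :=
  (PySem.List.pyRange 0 (matriz.length : Int)).foldl (fun lista i =>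
    if columnaA matriz i = (columnaA matriz i).reverse then lista ++ [i] else lista) []

-- ===== PORT B =====
-- termination fact for esPalindromo: s[1:-1] is strictly shorter when len(s) ≥ 2
theorem slice_one_neg_one_length_lt (s : List Char) (h : ¬ s.length < 2) :
    (PySem.List.slice s (some 1) (some (-1))).length < s.length := by
  rw [PySem.List.length_slice, PySem.List.clampIdx_neg_one]
  have : PySem.List.clampIdx s.length 1 = min 1 s.length := by simp
  omega

-- 'def esPalindromo(s)': len(s) < 2 → True; else s[0] == s[-1] and esPalindromo(s[1:-1])
def esPalindromo (s : List Char) : Bool :=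
  if s.length < 2 then true
  else (PySem.List.pyGetD s 0 ' ' == PySem.List.pyGetD s (-1) ' ')
       && esPalindromo (PySem.List.slice s (some 1) (some (-1)))
termination_by s.length
decreasing_by exact slice_one_neg_one_length_lt s (by assumption)

-- "".join(str(matriz[j][i]) for j in range(n))
def colStringB (matriz : List (List Int)) (i : Int) : List Char :=
  ((PySem.List.pyRange 0 (matriz.length : Int)).map
    (fun j => PySem.Int.toChars (PySem.List.pyGetD (PySem.List.pyGetD matriz j []) i 0))).flatten

-- the list comprehension [i for i in range(n) if esPalindromo(...)]
def columnasPalindromos_alt (matriz : List (List Int)) : List Int :=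
  (PySem.List.pyRange 0 (matriz.length : Int)).filter
    (fun i => esPalindromo (colStringB matriz i))

-- ===== PRECONDITION & SPEC =====
-- Pre_ excludes ragged/short-row inputs: A indexes matriz[j][i] for all i,j < len(matriz) and raises
-- IndexError when some row is shorter than len(matriz) (B raises there too).
def Pre_columnasPalindromos (matriz : List (List Int)) : Prop :=
  ∀ fila ∈ matriz, matriz.length ≤ fila.length
instance (matriz : List (List Int)) : Decidable (Pre_columnasPalindromos matriz) := by unfold Pre_columnasPalindromos; infer_instance
def pvWitness_columnasPalindromos : List (List Int) := [[1, 2, 1], [3, 1, 3], [1, 2, 1]]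
def Spec_columnasPalindromos (matriz : List (List Int)) (out : List Int) : Prop := out = columnasPalindromos_alt matriz
instance (matriz : List (List Int)) (out : List Int) : Decidable (Spec_columnasPalindromos matriz out) := by unfold Spec_columnasPalindromos; infer_instance

-- ===== CLAIM (what is proved, stated in full; the proofs are below) =====
def Claim_equal_columnasPalindromos : Prop := ∀ (matriz : List (List Int)), Dom_columnasPalindromos matriz → Pre_columnasPalindromos matriz → Spec_columnasPalindromos matriz (columnasPalindromos matriz)

-- ===== LEMMAS AND PROOFS =====

-- s[1:-1] peels the first and last element off a two-ended list
theorem slice_one_neg_one (a c : Char) (m : List Char) :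
    PySem.List.slice (a :: (m ++ [c])) (some 1) (some (-1)) = m := by
  have hlen : (a :: (m ++ [c])).length = m.length + 2 := by simp
  simp only [PySem.List.slice, PySem.List.clampIdx, hlen]
  have h1 : ¬ ((1 : Int) < 0) := by norm_num
  have h2 : ((-1 : Int) < 0) := by norm_num
  have h3 : ¬ ((m.length + 2 : Nat) + (-1 : Int) < 0) := by push_cast; omega
  rw [if_neg h1, if_pos h2, if_neg h3]
  have h4 : min (1 : Int).toNat (m.length + 2) = 1 := by simp
  have h5 : (((m.length + 2 : Nat) : Int) + -1).toNat = m.length + 1 := by omega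
  rw [h4, h5]
  show List.take (m.length + 1 - 1) (List.drop 1 (a :: (m ++ [c]))) = m
  simp

-- a two-ended list equals its reverse iff the ends match and the middle does
theorem pal_peel (a c : Char) (m : List Char) :
    (a :: (m ++ [c]) = (a :: (m ++ [c])).reverse) ↔ (a = c ∧ m = m.reverse) := by
  have hrev : (a :: (m ++ [c])).reverse = c :: (m.reverse ++ [a]) := by simp
  rw [hrev]
  constructor
  · intro h
    injection h with h1 h2
    subst h1
    exact ⟨rfl, List.append_cancel_right h2⟩
  · rintro ⟨rfl, hm⟩
    rw [← hm]

-- the recursive end-peeling check decides 's equals its reverse'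
theorem esPal_aux (n : Nat) : ∀ s : List Char, s.length ≤ n → (esPalindromo s = true ↔ s = s.reverse) := by
  induction n with
  | zero =>
    intro s hs
    have : s = [] := List.eq_nil_of_length_eq_zero (by omega)
    subst this
    simp [esPalindromo]
  | succ n ih =>
    intro s hs
    by_cases h2 : s.length < 2
    · rw [esPalindromo, if_pos h2]
      rcases s with _ | ⟨x, _ | ⟨y, u⟩⟩
      · simp
      · simp
      · simp at h2
    · rcases s with _ | ⟨a, t⟩
      · simp at h2
      have ht : t ≠ [] := by rintro rfl; simp at h2
      obtain ⟨m, c, rfl⟩ : ∃ m c, t = m ++ [c] :=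
        ⟨t.dropLast, t.getLast ht, (List.dropLast_append_getLast ht).symm⟩
      rw [esPalindromo, if_neg h2]
      have hlast : PySem.List.pyGetD (a :: (m ++ [c])) (-1) ' ' = c := by
        rw [← List.cons_append, PySem.List.pyGetD_neg_one_append_singleton]
      rw [PySem.List.pyGetD_zero_cons, hlast, slice_one_neg_one, pal_peel]
      have hm : m.length ≤ n := by
        have : (a :: (m ++ [c])).length = m.length + 2 := by simp
        omega
      rw [Bool.and_eq_true, beq_iff_eq, ih m hm]

theorem esPalindromo_iff (s : List Char) : esPalindromo s = true ↔ s = s.reverse :=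
  esPal_aux s.length s le_rfl

-- A's column string is B's column string
theorem colString_eq (matriz : List (List Int)) (i : Int) :
    columnaA matriz i = colStringB matriz i := by
  unfold columnaA colStringB
  rw [PySem.List.foldl_append_eq_flatMap, List.nil_append, List.flatMap_def]

theorem columnasPalindromos_eq (matriz : List (List Int)) :
    columnasPalindromos matriz = columnasPalindromos_alt matriz := by
  unfold columnasPalindromos columnasPalindromos_alt
  rw [PySem.List.foldl_append_ite_eq_filter
        (fun i => columnaA matriz i = (columnaA matriz i).reverse), List.nil_append]
  apply List.filter_congr
  intro i _
  rw [← colString_eq matriz i]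
  rcases Bool.eq_false_or_eq_true (esPalindromo (columnaA matriz i)) with hb | hb
  · rw [hb, decide_eq_true ((esPalindromo_iff _).mp hb)]
  · rw [hb, decide_eq_false]
    intro hh
    rw [← esPalindromo_iff] at hh
    rw [hb] at hh
    exact Bool.false_ne_true hh

-- ===== VERDICT (by name: the statement is the Claim_ definition above) =====
theorem columnasPalindromos_spec : Claim_equal_columnasPalindromos := by
  intro matriz _ _
  unfold Spec_columnasPalindromos
  exact columnasPalindromos_eq matriz
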